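-- pv_equiv track=rewrite | github.com/GuillaumeDurandGD/code-challenge | version_2.py | _get_starting_sequence
-- ===== SOURCE A (Python) =====
-- def _get_starting_sequence(
--     list_of_tracks, concert_premiere_length, number_of_tracks_to_play
-- ):
--     """
--     Return the optimal starting point to research the list of track
--     """
--     previous_diff = None
--
--     for i in range(0, len(list_of_tracks) - (number_of_tracks_to_play - 1)):
--         sequence_duration = sum(list_of_tracks[i : i + number_of_tracks_to_play])
--
--         current_diff_duration = sequence_duration - concert_premiere_length
--
--         if (i > 0) and (abs(previous_diff) < abs(current_diff_duration)):
--                 start_index = i - 1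
--                 break
--
--         previous_diff = current_diff_duration
--         start_index = i
--
--     return [i for i in range(start_index, start_index + number_of_tracks_to_play)]
-- ===== SOURCE B (Python) =====
-- def _get_starting_sequence(
--     list_of_tracks, concert_premiere_length, number_of_tracks_to_play
-- ):
--     """Sliding-window re-implementation: keep a running window sum and stop
--     at the first start index whose |window - target| strictly increases."""
--     k = number_of_tracks_to_play
--     n = len(list_of_tracks)
--     if k <= 0:
--         return []
--     window = sum(list_of_tracks[:k])
--     best_diff = abs(window - concert_premiere_length)
--     start = 0
--     for i in range(1, n - k + 1):
--         window += list_of_tracks[i + k - 1] - list_of_tracks[i - 1]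
--         diff = abs(window - concert_premiere_length)
--         if best_diff < diff:
--             break
--         best_diff = diff
--         start = i
--     return list(range(start, start + k))
-- ===== Notes on version B (the rewrite author's own statement) =====
-- stated objective: faster
-- what changed: Replaces the per-start re-summation of each k-track window with a single sliding-window pass that updates a running sum by one addition and one subtraction per step.
import Mathlib
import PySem

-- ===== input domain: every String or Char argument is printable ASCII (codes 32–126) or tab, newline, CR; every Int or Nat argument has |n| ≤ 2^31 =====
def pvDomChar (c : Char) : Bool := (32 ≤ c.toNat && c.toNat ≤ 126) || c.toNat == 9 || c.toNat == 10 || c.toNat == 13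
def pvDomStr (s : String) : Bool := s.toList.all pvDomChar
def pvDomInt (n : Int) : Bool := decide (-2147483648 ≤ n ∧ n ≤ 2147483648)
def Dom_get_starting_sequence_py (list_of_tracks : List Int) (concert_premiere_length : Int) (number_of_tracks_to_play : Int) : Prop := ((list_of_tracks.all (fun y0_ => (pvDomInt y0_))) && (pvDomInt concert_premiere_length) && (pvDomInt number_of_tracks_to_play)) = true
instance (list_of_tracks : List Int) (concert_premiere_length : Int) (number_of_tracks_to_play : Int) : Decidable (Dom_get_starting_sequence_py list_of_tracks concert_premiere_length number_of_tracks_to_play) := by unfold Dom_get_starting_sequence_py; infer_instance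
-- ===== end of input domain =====

-- B replaces A's per-start window re-summation with a single sliding-window pass
-- (running sum updated incrementally): asymptotically faster, same result on Pre_.


-- ===== PORT A =====
-- sum(list_of_tracks[i : i + k])
def pvSeqSum (xs : List Int) (i k : Int) : Int :=
  (PySem.List.slice xs (some i) (some (i + k))).sum

-- A's for-loop with break: state = (previous_diff, start_index), both unset before the
-- first iteration (Option); returns the final start_index.
def pvAGo (xs : List Int) (L k : Int) :
    List Int → Option Int → Option Int → Option Int
  | [], _, st => st
  | i :: rest, prev, _ =>
    let cur := pvSeqSum xs i k - L
    if 0 < i ∧ |prev.getD 0| < |cur| then some (i - 1)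
    else pvAGo xs L k rest (some cur) (some i)

def get_starting_sequence_py (list_of_tracks : List Int) (concert_premiere_length : Int) (number_of_tracks_to_play : Int) : List Int :=
  match pvAGo list_of_tracks concert_premiere_length number_of_tracks_to_play
      (PySem.List.pyRange 0 ((list_of_tracks.length : Int) - (number_of_tracks_to_play - 1)) 1) none none with
  | none => []  -- Python raises UnboundLocalError here (loop never ran); excluded by Pre_
  | some s => PySem.List.pyRange s (s + number_of_tracks_to_play) 1

-- ===== PORT B =====
-- B's loop: state = (window running sum, best_diff, start); stops at the first strict
-- increase of |window - target|.
def pvBGo (xs : List Int) (L k : Int) : List Int → Int → Int → Int → Int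
  | [], _, _, s => s
  | i :: rest, w, p, s =>
    let w' := w + PySem.List.pyGetD xs (i + k - 1) 0 - PySem.List.pyGetD xs (i - 1) 0
    let cur := |w' - L|
    if p < cur then s
    else pvBGo xs L k rest w' cur i

-- list(range(start, start + k))
def pvBRange (k s : Int) : List Int :=
  PySem.List.pyRange s (s + k) 1

def get_starting_sequence_py_alt (list_of_tracks : List Int) (concert_premiere_length : Int) (number_of_tracks_to_play : Int) : List Int :=
  if number_of_tracks_to_play ≤ 0 then []
  else
    pvBRange number_of_tracks_to_play
      (pvBGo list_of_tracks concert_premiere_length number_of_tracks_to_play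
        (PySem.List.pyRange 1 ((list_of_tracks.length : Int) - number_of_tracks_to_play + 1) 1)
        ((PySem.List.slice list_of_tracks none (some number_of_tracks_to_play)).sum)
        |(PySem.List.slice list_of_tracks none (some number_of_tracks_to_play)).sum - concert_premiere_length| 0)

-- ===== PRECONDITION & SPEC =====
-- Pre_ excludes exactly the inputs where A raises UnboundLocalError: the loop range is
-- empty when number_of_tracks_to_play > len(list_of_tracks), so start_index is never set.
def Pre_get_starting_sequence_py (list_of_tracks : List Int) (concert_premiere_length : Int) (number_of_tracks_to_play : Int) : Prop :=
  number_of_tracks_to_play ≤ (list_of_tracks.length : Int)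
instance (list_of_tracks : List Int) (concert_premiere_length : Int) (number_of_tracks_to_play : Int) : Decidable (Pre_get_starting_sequence_py list_of_tracks concert_premiere_length number_of_tracks_to_play) := by unfold Pre_get_starting_sequence_py; infer_instance

def pvWitness_get_starting_sequence_py : List Int × Int × Int := ([1, 2, 3, 4], 5, 2)

def Spec_get_starting_sequence_py (list_of_tracks : List Int) (concert_premiere_length : Int) (number_of_tracks_to_play : Int) (out : List Int) : Prop := out = get_starting_sequence_py_alt list_of_tracks concert_premiere_length number_of_tracks_to_play
instance (list_of_tracks : List Int) (concert_premiere_length : Int) (number_of_tracks_to_play : Int) (out : List Int) : Decidable (Spec_get_starting_sequence_py list_of_tracks concert_premiere_length number_of_tracks_to_play out) := by unfold Spec_get_starting_sequence_py; infer_instance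

-- ===== CLAIM (what is proved, stated in full; the proofs are below) =====
def Claim_equal_get_starting_sequence_py : Prop := ∀ (list_of_tracks : List Int) (concert_premiere_length : Int) (number_of_tracks_to_play : Int), Dom_get_starting_sequence_py list_of_tracks concert_premiere_length number_of_tracks_to_play → Pre_get_starting_sequence_py list_of_tracks concert_premiere_length number_of_tracks_to_play → Spec_get_starting_sequence_py list_of_tracks concert_premiere_length number_of_tracks_to_play (get_starting_sequence_py list_of_tracks concert_premiere_length number_of_tracks_to_play)

-- ===== LEMMAS AND PROOFS =====

-- A's loop returns a set start_index whenever it runs at least once (or one was set).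
lemma pvAGo_isSome (xs : List Int) (L k : Int) :
    ∀ (l : List Int) (prev st : Option Int), l ≠ [] ∨ st.isSome →
      (pvAGo xs L k l prev st).isSome := by
  intro l
  induction l with
  | nil => intro prev st h; rcases h with h | h; · exact absurd rfl h
           · simpa [pvAGo] using h
  | cons i rest ih =>
    intro prev st _
    simp only [pvAGo]
    split
    · rfl
    · exact ih _ _ (by by_cases hr : rest = [] <;> simp [hr])

-- window sums over Nat indices
def pvWin (xs : List Int) (i m : Nat) : Int := ((xs.drop i).take m).sum

-- sliding identity: the next window's sum is the previous one plus the entering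
-- element minus the leaving one.
lemma pvWin_slide (xs : List Int) (i m : Nat) (h : i + m < xs.length) :
    pvWin xs (i + 1) m = pvWin xs i m + xs.getD (i + m) 0 - xs.getD i 0 := by
  rw [List.getD_eq_getElem xs 0 h, List.getD_eq_getElem xs 0 (by omega)]
  induction m generalizing i with
  | zero => simp [pvWin]
  | succ m ih =>
    have hi : i < xs.length := by omega
    have hdrop : xs.drop i = xs[i] :: xs.drop (i + 1) :=
      List.drop_eq_getElem_cons hi
    have h1 : pvWin xs i (m + 1) = xs[i] + pvWin xs (i + 1) m := by
      unfold pvWin; rw [hdrop, List.take_succ_cons, List.sum_cons]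
    have hi1 : i + 1 < xs.length := by omega
    have hdrop1 : xs.drop (i + 1) = xs[i + 1] :: xs.drop (i + 2) :=
      List.drop_eq_getElem_cons hi1
    have h2 : pvWin xs (i + 1) (m + 1) = xs[i + 1] + pvWin xs (i + 2) m := by
      unfold pvWin; rw [hdrop1, List.take_succ_cons, List.sum_cons]
    have h3 := ih (i := i + 1) (by omega)
    have h4 : xs[i + 1 + m] = xs[i + (m + 1)]'(by omega) := by congr 1; omega
    rw [h1, h2, h3, h4]
    ring

-- pvSeqSum at a nonnegative Int start with positive width is pvWin.
lemma pvSeqSum_eq_pvWin (xs : List Int) (j k : Int) (hj : 0 ≤ j) (hk : 0 ≤ k) :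
    pvSeqSum xs j k = pvWin xs j.toNat k.toNat := by
  unfold pvSeqSum pvWin
  rw [PySem.List.slice_toNat xs hj (by omega)]
  have h : (j + k).toNat - j.toNat = k.toNat := by omega
  rw [h]

-- the Int-level sliding identity used to match B's incremental update to A's re-sum
lemma pvSlide (xs : List Int) (j k : Int) (hj : 1 ≤ j) (hk : 1 ≤ k)
    (hjk : j + k ≤ (xs.length : Int)) :
    pvSeqSum xs (j - 1) k + PySem.List.pyGetD xs (j + k - 1) 0
      - PySem.List.pyGetD xs (j - 1) 0 = pvSeqSum xs j k := by
  obtain ⟨a, ha⟩ : ∃ a : Nat, j = (a : Int) + 1 := ⟨(j - 1).toNat, by omega⟩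
  obtain ⟨m, hm⟩ : ∃ m : Nat, k = (m : Int) := ⟨k.toNat, by omega⟩
  subst ha hm
  have hlen : a + m < xs.length := by
    have := hjk; push_cast at this; omega
  have e1 : (a : Int) + 1 - 1 = ((a : Nat) : Int) := by omega
  have e2 : (a : Int) + 1 + (m : Int) - 1 = (((a + m : Nat) : Nat) : Int) := by
    push_cast; ring
  rw [e1, e2, PySem.List.pyGetD_natCast, PySem.List.pyGetD_natCast,
    pvSeqSum_eq_pvWin xs _ _ (by omega) (by omega),
    pvSeqSum_eq_pvWin xs _ _ (by omega) (by omega)]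
  have e3 : ((a : Int)).toNat = a := by omega
  have e4 : ((a : Int) + 1).toNat = a + 1 := by omega
  have e5 : ((m : Int)).toNat = m := by omega
  rw [e3, e4, e5, pvWin_slide xs a m hlen]

-- main loop correspondence: entering iteration j with matching states, A's loop
-- returns (some of) B's loop result.
lemma pvGo_eq (xs : List Int) (L k : Int) (hk : 1 ≤ k) :
    ∀ (c : Nat) (j : Int), 1 ≤ j → j + c = (xs.length : Int) - k + 1 →
      pvAGo xs L k (PySem.List.pyRange j ((xs.length : Int) - k + 1) 1)
          (some (pvSeqSum xs (j - 1) k - L)) (some (j - 1))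
        = some (pvBGo xs L k (PySem.List.pyRange j ((xs.length : Int) - k + 1) 1)
            (pvSeqSum xs (j - 1) k) |pvSeqSum xs (j - 1) k - L| (j - 1)) := by
  intro c
  induction c with
  | zero =>
    intro j hj hsum
    rw [PySem.List.pyRange_one_eq_nil (by omega)]
    simp [pvAGo, pvBGo]
  | succ c ih =>
    intro j hj hsum
    rw [PySem.List.pyRange_one_cons (by push_cast at hsum ⊢; omega)]
    simp only [pvAGo, pvBGo, Option.getD_some]
    have hslide := pvSlide xs j k hj hk (by omega)
    rw [hslide]
    by_cases hbr : |pvSeqSum xs (j - 1) k - L| < |pvSeqSum xs j k - L|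
    · rw [if_pos ⟨by omega, hbr⟩, if_pos hbr]
    · rw [if_neg (by tauto), if_neg hbr]
      have := ih (j + 1) (by omega) (by omega)
      simpa using this

-- ===== VERDICT (by name: the statement is the Claim_ definition above) =====
theorem get_starting_sequence_py_spec : Claim_equal_get_starting_sequence_py := by
  intro xs L k _ hpre
  unfold Pre_get_starting_sequence_py at hpre
  unfold Spec_get_starting_sequence_py get_starting_sequence_py get_starting_sequence_py_alt
  by_cases hk : k ≤ 0
  · -- both sides are the empty list: the returned range is empty since k ≤ 0
    rw [if_pos hk]
    have hne : PySem.List.pyRange 0 ((xs.length : Int) - (k - 1)) 1 ≠ [] := by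
      rw [PySem.List.pyRange_one_cons (by omega)]; simp
    have hsome := pvAGo_isSome xs L k
      (PySem.List.pyRange 0 ((xs.length : Int) - (k - 1)) 1) none none (Or.inl hne)
    obtain ⟨s, hs⟩ := Option.isSome_iff_exists.mp hsome
    rw [hs]
    exact PySem.List.pyRange_one_eq_nil (by omega)
  · rw [if_neg (by omega)]
    have hm : (0 : Int) < (xs.length : Int) - (k - 1) := by omega
    rw [PySem.List.pyRange_one_cons hm]
    simp only [pvAGo]
    rw [if_neg (by simp)]
    have hrange : PySem.List.pyRange (0 + 1) ((xs.length : Int) - (k - 1)) 1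
        = PySem.List.pyRange 1 ((xs.length : Int) - k + 1) 1 := by
      norm_num; congr 1; ring
    have hw0 : (PySem.List.slice xs none (some k)).sum = pvSeqSum xs 0 k := by
      unfold pvSeqSum
      rw [PySem.List.slice_zero_start]
      norm_num
    have hmain := pvGo_eq xs L k (by omega) ((xs.length : Int) - k).toNat 1
      (by omega) (by omega)
    norm_num at hmain
    rw [hrange, hmain, hw0]
    rfl
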